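-- pv_equiv track=rewrite | github.com/luizaugustoliveira/Algoritmos | Testes_Scripts/ordena_tipos.py | ordena_tipos
-- ===== SOURCE A (Python) =====
-- def ordena_tipos(elementos):
--     num = []
--     letras = []
--     outros_tipos = []
--     for i in range(len(elementos)):
--         if elementos[i].isdigit() == True:
--             num.append(elementos[i])
--         elif elementos[i].isalpha() == True:
--             letras.append(elementos[i])
--         else:
--             outros_tipos.append(elementos[i])
--
--     lista = num + letras + outros_tipos
--
--     return lista
-- ===== SOURCE B (Python) =====
-- def ordena_tipos(elementos):
--     def chave(e):
--         if e.isdigit():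
--             return 0
--         elif e.isalpha():
--             return 1
--         return 2
--     return sorted(elementos, key=chave)
-- ===== Notes on version B (the rewrite author's own statement) =====
-- stated objective: idiomatic
-- what changed: Replaces the explicit three-list partition-and-concatenate with a single stable sort by a 0/1/2 category key, relying on sort stability to keep each category's original order.
import Mathlib
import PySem

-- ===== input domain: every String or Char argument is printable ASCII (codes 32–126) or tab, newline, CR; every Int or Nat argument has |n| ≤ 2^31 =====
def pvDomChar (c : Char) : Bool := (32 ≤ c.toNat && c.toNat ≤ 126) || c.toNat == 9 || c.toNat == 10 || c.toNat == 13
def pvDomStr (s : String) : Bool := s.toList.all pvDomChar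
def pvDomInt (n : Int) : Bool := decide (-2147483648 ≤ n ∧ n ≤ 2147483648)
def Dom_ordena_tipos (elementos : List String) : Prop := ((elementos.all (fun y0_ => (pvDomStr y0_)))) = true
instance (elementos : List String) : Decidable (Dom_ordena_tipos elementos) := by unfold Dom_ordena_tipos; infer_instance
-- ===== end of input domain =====

-- B replaces A's explicit three-list partition-and-concatenate by one stable sort with a 0/1/2 category key (idiomatic; same result by sort stability).


-- ===== PORT A =====
def ordena_tipos (elementos : List String) : List String :=
  let res := (PySem.List.pyRange 0 (PySem.List.len elementos) 1).foldl
    (fun (acc : List String × List String × List String) i =>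
      let e := PySem.List.pyGetD elementos i ""
      if PySem.Str.strIsdigit e then (acc.1 ++ [e], acc.2.1, acc.2.2)
      else if PySem.Str.strIsalpha e then (acc.1, acc.2.1 ++ [e], acc.2.2)
      else (acc.1, acc.2.1, acc.2.2 ++ [e]))
    ([], [], [])
  res.1 ++ res.2.1 ++ res.2.2

-- ===== PORT B =====
def chave (e : String) : Int :=
  if PySem.Str.strIsdigit e then 0 else if PySem.Str.strIsalpha e then 1 else 2

def ordena_tipos_alt (elementos : List String) : List String :=
  PySem.List.sorted elementos chave

-- ===== PRECONDITION & SPEC =====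
def Spec_ordena_tipos (elementos : List String) (out : List String) : Prop :=
  out = ordena_tipos_alt elementos
instance (elementos : List String) (out : List String) : Decidable (Spec_ordena_tipos elementos out) := by
  unfold Spec_ordena_tipos; infer_instance

-- ===== CLAIM =====
def Claim_equal_ordena_tipos : Prop :=
  ∀ (elementos : List String), Dom_ordena_tipos elementos →
    Spec_ordena_tipos elementos (ordena_tipos elementos)

-- ===== LEMMAS AND PROOFS =====

theorem chave_cases (e : String) : chave e = 0 ∨ chave e = 1 ∨ chave e = 2 := by
  unfold chave; split_ifs <;> simp

theorem insertBy_append_of_not {α : Type} (before : α → α → Bool) (x : α) (A B : List α)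
    (h : ∀ y ∈ A, before x y = false) :
    PySem.List.insertBy before x (A ++ B) = A ++ PySem.List.insertBy before x B := by
  induction A with
  | nil => rfl
  | cons a A ih =>
    have ha : before x a = false := h a (by simp)
    simp only [List.cons_append, PySem.List.insertBy, ha]
    simp [ih (fun y hy => h y (by simp [hy]))]

theorem insertBy_head_before {α : Type} (before : α → α → Bool) (x : α) (B : List α)
    (h : ∀ y ∈ B, before x y = true) :
    PySem.List.insertBy before x B = x :: B := by
  cases B with
  | nil => rfl
  | cons b B => simp [PySem.List.insertBy, h b (by simp)]

-- stable sort by the 0/1/2 key = concatenation of the three key-filters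
theorem sorted_chave_eq (xs : List String) :
    PySem.List.sorted xs chave =
      xs.filter (fun e => chave e == 0) ++ xs.filter (fun e => chave e == 1)
        ++ xs.filter (fun e => chave e == 2) := by
  rw [PySem.List.sorted_eq_foldl_insertBy]
  induction xs using List.reverseRecOn with
  | nil => rfl
  | append_singleton ys x ih =>
    rw [List.foldl_append, List.foldl_cons, List.foldl_nil, ih]
    have mem0 : ∀ y ∈ ys.filter (fun e => chave e == 0), chave y = 0 := by
      intro y hy; simpa using (List.of_mem_filter hy)
    have mem1 : ∀ y ∈ ys.filter (fun e => chave e == 1), chave y = 1 := by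
      intro y hy; simpa using (List.of_mem_filter hy)
    have mem2 : ∀ y ∈ ys.filter (fun e => chave e == 2), chave y = 2 := by
      intro y hy; simpa using (List.of_mem_filter hy)
    rcases chave_cases x with h | h | h
    · rw [List.append_assoc,
        insertBy_append_of_not _ x _ _ (by intro y hy; simp [h, mem0 y hy]),
        insertBy_head_before _ x _ (by
          intro y hy
          rcases List.mem_append.1 hy with hy' | hy'
          · simp [h, mem1 y hy']
          · simp [h, mem2 y hy'])]
      simp [List.filter_append, List.filter_cons, h]
    · rw [List.append_assoc,
        insertBy_append_of_not _ x _ _ (by intro y hy; simp [h, mem0 y hy]),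
        insertBy_append_of_not _ x _ _ (by intro y hy; simp [h, mem1 y hy]),
        insertBy_head_before _ x _ (by intro y hy; simp [h, mem2 y hy])]
      simp [List.filter_append, List.filter_cons, h]
    · rw [PySem.List.insertBy_of_forall_not_before _ x _ (by
        intro y hy
        rcases List.mem_append.1 hy with hy' | hy'
        · rcases List.mem_append.1 hy' with hy'' | hy''
          · simp [h, mem0 y hy'']
          · simp [h, mem1 y hy'']
        · simp [h, mem2 y hy'])]
      simp [List.filter_append, List.filter_cons, h]

-- A's triple-accumulator loop, characterised by filters
theorem foldlA_eq (xs : List String) (n l o : List String) :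
    xs.foldl
      (fun (acc : List String × List String × List String) e =>
        if PySem.Str.strIsdigit e then (acc.1 ++ [e], acc.2.1, acc.2.2)
        else if PySem.Str.strIsalpha e then (acc.1, acc.2.1 ++ [e], acc.2.2)
        else (acc.1, acc.2.1, acc.2.2 ++ [e]))
      (n, l, o)
    = (n ++ xs.filter (fun e => PySem.Str.strIsdigit e),
       l ++ xs.filter (fun e => !PySem.Str.strIsdigit e && PySem.Str.strIsalpha e),
       o ++ xs.filter (fun e => !PySem.Str.strIsdigit e && !PySem.Str.strIsalpha e)) := by
  induction xs generalizing n l o with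
  | nil => simp
  | cons x xs ih =>
    by_cases hd : PySem.Str.strIsdigit x = true
    · rw [List.foldl_cons, if_pos hd, ih]
      simp only [PySem.Str.strIsdigit_eq, PySem.Str.strIsalpha_eq] at hd ⊢
      simp [List.filter_cons, hd]
    · by_cases ha : PySem.Str.strIsalpha x = true
      · rw [List.foldl_cons, if_neg hd, if_pos ha, ih]
        have hd' := Bool.of_not_eq_true hd
        simp only [PySem.Str.strIsdigit_eq, PySem.Str.strIsalpha_eq] at hd' ha ⊢
        simp [List.filter_cons, hd', ha]
      · rw [List.foldl_cons, if_neg hd, if_neg ha, ih]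
        have hd' := Bool.of_not_eq_true hd
        have ha' := Bool.of_not_eq_true ha
        simp only [PySem.Str.strIsdigit_eq, PySem.Str.strIsalpha_eq] at hd' ha' ⊢
        simp [List.filter_cons, hd', ha']

theorem chave0_iff (e : String) : (chave e == 0) = PySem.Str.strIsdigit e := by
  unfold chave; split_ifs <;> simp_all

theorem chave1_iff (e : String) :
    (chave e == 1) = (!PySem.Str.strIsdigit e && PySem.Str.strIsalpha e) := by
  unfold chave; split_ifs <;> simp_all

theorem chave2_iff (e : String) :
    (chave e == 2) = (!PySem.Str.strIsdigit e && !PySem.Str.strIsalpha e) := by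
  unfold chave; split_ifs <;> simp_all

-- ===== VERDICT =====
theorem ordena_tipos_spec : Claim_equal_ordena_tipos := by
  intro elementos _
  unfold Spec_ordena_tipos ordena_tipos ordena_tipos_alt
  rw [PySem.List.foldl_pyRange_zero_pyGetD elementos ""
    (fun (acc : List String × List String × List String) e =>
      if PySem.Str.strIsdigit e then (acc.1 ++ [e], acc.2.1, acc.2.2)
      else if PySem.Str.strIsalpha e then (acc.1, acc.2.1 ++ [e], acc.2.2)
      else (acc.1, acc.2.1, acc.2.2 ++ [e])) ([], [], [])]
  rw [foldlA_eq, sorted_chave_eq]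
  simp [chave0_iff, chave1_iff, chave2_iff]
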